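-- pv_equiv track=rewrite | github.com/thealper2/codewars-solutions | 7-kyu/ordered_count_of_characters.py | ordered_count
-- ===== SOURCE A (Python) =====
-- from collections import defaultdict
--
-- def ordered_count(inp):
--     d = defaultdict(int)
--     order = []
--
--     for c in inp:
--         if c not in d:
--             order.append(c)
--
--         d[c] += 1
--
--     result = [(char, d[char]) for char in order]
--     return result
-- ===== SOURCE B (Python) =====
-- def ordered_count(inp):
--     result = []
--     rest = list(inp)
--     while rest:
--         c = rest[0]
--         result.append((c, rest.count(c)))
--         rest = [x for x in rest if x != c]
--     return result
-- ===== Notes on version B (the rewrite author's own statement) =====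
-- stated objective: alternative
-- what changed: A makes one accumulating pass maintaining a counter dict plus a first-seen order list; B repeatedly peels off the first remaining character, records its count in the remaining list, and filters out all its occurrences, shrinking the worklist until empty (no dict, no per-character accumulator).
import Mathlib
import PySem

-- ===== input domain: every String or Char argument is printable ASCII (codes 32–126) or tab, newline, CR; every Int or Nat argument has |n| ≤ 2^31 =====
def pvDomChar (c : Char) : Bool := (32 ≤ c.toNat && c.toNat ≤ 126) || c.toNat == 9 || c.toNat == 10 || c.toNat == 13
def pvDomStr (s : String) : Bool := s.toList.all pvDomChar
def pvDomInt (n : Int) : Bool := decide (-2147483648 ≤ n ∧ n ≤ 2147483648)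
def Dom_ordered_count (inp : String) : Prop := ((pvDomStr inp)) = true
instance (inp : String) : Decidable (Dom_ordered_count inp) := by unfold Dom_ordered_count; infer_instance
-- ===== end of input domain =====

-- B replaces A's single accumulating pass (counter dict + first-seen order list) by a shrinking
-- worklist: peel the first remaining character, count it in the remainder, filter it out, repeat.

-- ===== PORT A =====
-- loop state: (d : counting dict, order : list of first-seen characters)
def ordered_count (inp : String) : List (String × Int) :=
  let st := inp.toList.foldl
    (fun (st : PySem.Dict Char Int × List Char) c =>
      let order := if st.1.contains c then st.2 else st.2 ++ [c]
      (st.1.modify c 0 (· + 1), order))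
    (PySem.Dict.empty, [])
  st.2.map (fun ch => (String.ofList [ch], st.1.getD ch 0))

-- ===== PORT B =====
-- the while loop over the shrinking 'rest'; rest.count(c) → PySem.List.count,
-- [x for x in rest if x != c] → List.filter
def ordered_count_alt_go : List Char → List (String × Int)
  | [] => []
  | c :: t =>
    (String.ofList [c], (PySem.List.count (c :: t) c : Int))
      :: ordered_count_alt_go ((c :: t).filter (fun x => x != c))
termination_by l => l.length
decreasing_by
  simp only [List.filter_cons]
  simp only [bne_self_eq_false, Bool.false_eq_true, if_false]
  exact Nat.lt_succ_of_le (List.length_filter_le _ _)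

def ordered_count_alt (inp : String) : List (String × Int) :=
  ordered_count_alt_go inp.toList

-- ===== PRECONDITION & SPEC =====
def Spec_ordered_count (inp : String) (out : List (String × Int)) : Prop := out = ordered_count_alt inp
instance (inp : String) (out : List (String × Int)) : Decidable (Spec_ordered_count inp out) := by unfold Spec_ordered_count; infer_instance

-- ===== CLAIM (what is proved, stated in full; the proofs are below) =====
def Claim_equal_ordered_count : Prop := ∀ (inp : String), Dom_ordered_count inp → Spec_ordered_count inp (ordered_count inp)

-- ===== LEMMAS AND PROOFS =====

theorem set_contains_add (s : PySem.Set Char) (x a : Char) :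
    PySem.Set.contains (PySem.Set.add s x) a = (a == x || PySem.Set.contains s a) := by
  rw [Bool.eq_iff_iff]
  simp [PySem.Set.mem_add]
  tauto

-- A's loop computes (counter of the characters consumed so far, their ordered set).
theorem loop_eq (xs : List Char) : ∀ (d : PySem.Dict Char Int) (s : List Char),
    (∀ a, d.contains a = PySem.Set.contains s a) →
    xs.foldl
      (fun (st : PySem.Dict Char Int × List Char) c =>
        let order := if st.1.contains c then st.2 else st.2 ++ [c]
        (st.1.modify c 0 (· + 1), order))
      (d, s)
    = (xs.foldl (fun d x => d.modify x 0 (· + 1)) d, xs.foldl PySem.Set.add s) := by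
  induction xs with
  | nil => intro d s h; rfl
  | cons x t ih =>
    intro d s h
    simp only [List.foldl_cons]
    have hadd : (if d.contains x then s else s ++ [x]) = PySem.Set.add s x := by
      rw [h x]; rfl
    rw [hadd]
    apply ih
    intro a
    rw [PySem.Dict.contains_modify, set_contains_add, h a]

-- folding Set.add ignores the occurrences of an element already in the accumulator
theorem foldl_add_filter (c : Char) : ∀ (t : List Char) (s : PySem.Set Char), c ∈ s →
    t.foldl PySem.Set.add s = (t.filter (fun x => x != c)).foldl PySem.Set.add s := by
  intro t
  induction t with
  | nil => intro s h; rfl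
  | cons x xs ih =>
    intro s h
    by_cases hx : x = c
    · subst hx
      have hcs : PySem.Set.contains s x = true := by simpa [PySem.Set.contains] using h
      have hadd : PySem.Set.add s x = s := by unfold PySem.Set.add; rw [hcs]; simp
      simp only [List.filter_cons, bne_self_eq_false, Bool.false_eq_true, if_false,
        List.foldl_cons, hadd]
      exact ih s h
    · have hb : (x != c) = true := by simp [hx]
      simp only [List.filter_cons, hb, if_true, List.foldl_cons]
      exact ih _ ((PySem.Set.mem_add s x c).mpr (Or.inl h))

-- a head element absent from the folded list stays at the front of the accumulator
theorem foldl_add_cons (c : Char) : ∀ (t : List Char) (s : List Char), c ∉ t →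
    t.foldl PySem.Set.add (c :: s) = c :: t.foldl PySem.Set.add s := by
  intro t
  induction t with
  | nil => intro s _; rfl
  | cons x xs ih =>
    intro s hc
    have hxc : (x == c) = false := by
      simp only [beq_eq_false_iff_ne]
      intro h; exact hc (by simp [h])
    have hstep : PySem.Set.add (c :: s) x = c :: PySem.Set.add s x := by
      have hne : ¬x = c := by simpa using hxc
      by_cases h : x ∈ s
      · simp [PySem.Set.add, PySem.Set.contains, h]
      · simp [PySem.Set.add, PySem.Set.contains, h, hne]
    simp only [List.foldl_cons, hstep]
    exact ih _ (fun h => hc (List.mem_cons_of_mem _ h))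

-- ordered dedup of c :: t = c followed by the ordered dedup of t with all c's removed
theorem ofList_cons_filter (c : Char) (t : List Char) :
    PySem.Set.ofList (c :: t) = c :: PySem.Set.ofList (t.filter (fun x => x != c)) := by
  have h1 : PySem.Set.ofList (c :: t) = t.foldl PySem.Set.add [c] := by
    rw [PySem.Set.ofList_eq_foldl]; rfl
  rw [h1, foldl_add_filter c t [c] (by simp),
    foldl_add_cons c _ _ (by simp [List.mem_filter]), ← PySem.Set.ofList_eq_foldl]

-- B's worklist recursion produces exactly the (first-seen char, total count) pairs
theorem go_eq : ∀ (n : Nat) (l : List Char), l.length ≤ n →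
    ordered_count_alt_go l
      = (PySem.Set.ofList l).map (fun c => (String.ofList [c], (List.count c l : Int))) := by
  intro n
  induction n with
  | zero =>
    intro l h
    have : l = [] := List.eq_nil_of_length_eq_zero (Nat.le_zero.mp h)
    subst this
    simp [ordered_count_alt_go]
  | succ n ih =>
    intro l h
    cases l with
    | nil => simp [ordered_count_alt_go]
    | cons c t =>
      rw [ordered_count_alt_go]
      have hfilter : (c :: t).filter (fun x => x != c) = t.filter (fun x => x != c) := by
        simp
      have hlen : (t.filter (fun x => x != c)).length ≤ n := by
        have := List.length_filter_le (fun x => x != c) t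
        have ht : t.length ≤ n := Nat.lt_succ_iff.mp (by simpa using h)
        omega
      rw [hfilter, ih _ hlen, ofList_cons_filter]
      simp only [List.map_cons, PySem.List.count_eq]
      congr 1
      apply List.map_congr_left
      intro x hx
      have hxmem : x ∈ t.filter (fun y => y != c) := (PySem.Set.mem_ofList _ x).mp hx
      have hxc : (x == c) = false := by
        have := List.of_mem_filter hxmem
        simpa using this
      have hne : ¬x = c := by simpa using hxc
      have hcx : (c == x) = false := by
        simp only [beq_eq_false_iff_ne]
        exact fun h' => hne h'.symm
      rw [List.count_filter (by simpa using hxc), List.count_cons]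
      simp [hcx]

-- ===== VERDICT (by name: the statement is the Claim_ definition above) =====
theorem ordered_count_spec : Claim_equal_ordered_count := by
  intro inp _
  unfold Spec_ordered_count ordered_count ordered_count_alt
  rw [loop_eq inp.toList PySem.Dict.empty []
    (by intro a; simp [PySem.Dict.contains_empty, PySem.Set.contains])]
  rw [← PySem.Dict.counter_eq_foldl, ← PySem.Set.ofList_eq_foldl]
  rw [go_eq inp.toList.length inp.toList le_rfl]
  apply List.map_congr_left
  intro c _
  simp [PySem.Dict.getD_counter]
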